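-- pv_equiv track=rewrite | github.com/ArpanaG123/Data-Structures-Algorithms | Stack-Queue/sum-of-subarray-ranges.py | findPreviousLarger
-- ===== SOURCE A (Python) =====
-- def findPreviousLarger(arr):
--     n = len(arr)
--     ple = [-1] * n
--     st = []
--
--     for i in range(n):
--         while len(st) != 0 and arr[st[-1]] <= arr[i]:
--             st.pop()
--         if len(st) == 0:
--             ple[i] = -1
--         else:
--             ple[i] = st[-1]
--         st.append(i)
--     return ple
-- ===== SOURCE B (Python) =====
-- def findPreviousLarger(arr):
--     n = len(arr)
--     ple = [-1] * n
--     for i in range(n):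
--         for j in range(i - 1, -1, -1):
--             if arr[j] > arr[i]:
--                 ple[i] = j
--                 break
--     return ple
-- ===== Notes on version B (the rewrite author's own statement) =====
-- stated objective: simpler
-- what changed: Replaces the monotonic stack with a stackless nested scan: each position scans its own prefix backwards for the first strictly larger element.
import Mathlib
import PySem

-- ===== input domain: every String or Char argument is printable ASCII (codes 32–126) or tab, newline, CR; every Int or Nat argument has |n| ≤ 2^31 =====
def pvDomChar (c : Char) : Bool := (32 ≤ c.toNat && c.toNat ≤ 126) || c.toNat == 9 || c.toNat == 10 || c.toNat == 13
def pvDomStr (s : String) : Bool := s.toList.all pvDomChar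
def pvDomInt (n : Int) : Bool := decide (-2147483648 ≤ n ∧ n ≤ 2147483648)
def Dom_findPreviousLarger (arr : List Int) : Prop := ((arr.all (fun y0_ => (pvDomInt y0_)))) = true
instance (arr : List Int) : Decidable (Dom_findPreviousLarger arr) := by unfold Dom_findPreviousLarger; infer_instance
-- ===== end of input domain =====

-- B replaces A's monotonic stack with a plain nested backward scan per index (simpler, no stack; O(n^2) vs O(n)).


-- ===== PORT A =====
-- Python's `while len(st) != 0 and arr[st[-1]] <= arr[i]: st.pop()`;
-- the stack is kept head-first (head = Python's st[-1]).
def popLoopA (arr : List Int) (x : Int) : List Nat → List Nat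
  | [] => []
  | j :: js => if arr.getD j 0 ≤ x then popLoopA arr x js else j :: js

def findPreviousLarger (arr : List Int) : List Int :=
  ((List.range arr.length).foldl (fun (s : List Int × List Nat) i =>
    let st := popLoopA arr (arr.getD i 0) s.2
    let v : Int := match st with | [] => -1 | j :: _ => (j : Int)
    (s.1 ++ [v], i :: st)) (([] : List Int), ([] : List Nat))).1

-- ===== PORT B =====
-- Python's inner `for j in range(i-1, -1, -1): if arr[j] > arr[i]: … break`
def scanPrevB (arr : List Int) (x : Int) : List Nat → Int
  | [] => -1
  | j :: js => if arr.getD j 0 > x then (j : Int) else scanPrevB arr x js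

def findPreviousLarger_alt (arr : List Int) : List Int :=
  (List.range arr.length).map (fun i => scanPrevB arr (arr.getD i 0) (List.range i).reverse)

-- ===== PRECONDITION & SPEC =====
def Spec_findPreviousLarger (arr : List Int) (out : List Int) : Prop := out = findPreviousLarger_alt arr
instance (arr : List Int) (out : List Int) : Decidable (Spec_findPreviousLarger arr out) := by unfold Spec_findPreviousLarger; infer_instance

-- ===== CLAIM (what is proved, stated in full; the proofs are below) =====
def Claim_equal_findPreviousLarger : Prop := ∀ (arr : List Int), Dom_findPreviousLarger arr → Spec_findPreviousLarger arr (findPreviousLarger arr)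

-- ===== LEMMAS AND PROOFS =====

-- The canonical stack A holds after processing the first k indices.
def stkA (arr : List Int) : Nat → List Nat
  | 0 => []
  | k + 1 => k :: popLoopA arr (arr.getD k 0) (stkA arr k)

theorem pop_pop (arr : List Int) {x y : Int} (h : y ≤ x) (L : List Nat) :
    popLoopA arr x (popLoopA arr y L) = popLoopA arr x L := by
  induction L with
  | nil => rfl
  | cons j js ih =>
    rw [popLoopA]
    by_cases hj : arr.getD j 0 ≤ y
    · rw [if_pos hj, ih, popLoopA, if_pos (hj.trans h)]
    · rw [if_neg hj]

theorem range_reverse_succ (k : Nat) :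
    (List.range (k + 1)).reverse = k :: (List.range k).reverse := by
  simp [List.range_succ]

theorem scan_eq (arr : List Int) (k : Nat) (x : Int) :
    scanPrevB arr x (List.range k).reverse =
      (match popLoopA arr x (stkA arr k) with | [] => (-1 : Int) | j :: _ => (j : Int)) := by
  induction k generalizing x with
  | zero => rfl
  | succ k ih =>
    rw [range_reverse_succ, scanPrevB, stkA, popLoopA]
    by_cases hk : arr.getD k 0 ≤ x
    · rw [if_neg (not_lt.mpr hk), if_pos hk, pop_pop arr hk, ih x]
    · rw [if_pos (lt_of_not_ge hk), if_neg hk]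

theorem fold_inv (arr : List Int) (k : Nat) :
    (List.range k).foldl (fun (s : List Int × List Nat) i =>
      let st := popLoopA arr (arr.getD i 0) s.2
      let v : Int := match st with | [] => -1 | j :: _ => (j : Int)
      (s.1 ++ [v], i :: st)) (([] : List Int), ([] : List Nat)) =
    ((List.range k).map (fun i => scanPrevB arr (arr.getD i 0) (List.range i).reverse),
      stkA arr k) := by
  induction k with
  | zero => rfl
  | succ k ih =>
    rw [List.range_succ, List.foldl_append, List.map_append, ih]
    simp only [List.foldl_cons, List.foldl_nil, List.map_cons, List.map_nil, stkA]
    exact congrArg (fun v => (_ ++ [v], _)) (scan_eq arr k (arr.getD k 0)).symm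

-- ===== VERDICT (by name: the statement is the Claim_ definition above) =====
theorem findPreviousLarger_spec : Claim_equal_findPreviousLarger := by
  intro arr _
  unfold Spec_findPreviousLarger findPreviousLarger findPreviousLarger_alt
  rw [fold_inv]
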